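-- pv_equiv track=rewrite | github.com/Prisych-Kostya/Generator_optimization | simulation.py | calculate_working_periods
-- ===== SOURCE A (Python) =====
-- def calculate_working_periods(opening_time: int, closing_time: int, electricity_off_periods: list[list[int]]) -> list[list[int, bool]]:
--     """forms working periods by removing electricity_off_periods
--     """
--     working_periods = []
--
--     # Add the initial working period if the cafe starts working immediately
--     if opening_time < electricity_off_periods[0][0]:
--         working_periods.append([opening_time, electricity_off_periods[0][0]])
--
--     # Iterate through electricity outages and add working periods
--     for i in range(len(electricity_off_periods) - 1):
--         working_periods.append([electricity_off_periods[i][1], electricity_off_periods[i + 1][0]])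
--
--     # Add the final working period if the cafe continues working after the last outage
--     if electricity_off_periods[-1][1] < closing_time:
--         working_periods.append([electricity_off_periods[-1][1], closing_time])
--
--     return working_periods
-- ===== SOURCE B (Python) =====
-- def calculate_working_periods(opening_time: int, closing_time: int, electricity_off_periods: list[list[int]]) -> list[list[int]]:
--     pts = [opening_time] + [t for p in electricity_off_periods for t in [p[0], p[1]]] + [closing_time]
--     periods = _pair_up(pts)
--     if not (opening_time < electricity_off_periods[0][0]):
--         periods = periods[1:]
--     if not (electricity_off_periods[-1][1] < closing_time):
--         periods = periods[:-1]
--     return periods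
--
--
-- def _pair_up(pts):
--     if len(pts) < 2:
--         return []
--     return [[pts[0], pts[1]]] + _pair_up(pts[2:])
-- ===== Notes on version B (the rewrite author's own statement) =====
-- stated objective: alternative
-- what changed: A accumulates periods with a head guard, an index loop over adjacent outages, and a tail guard; B instead flattens all boundary points into [opening] + endpoints + [closing], pairs them up by a recursive two-at-a-time split, and trims the first/last candidate period by the same two guards.
import Mathlib
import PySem

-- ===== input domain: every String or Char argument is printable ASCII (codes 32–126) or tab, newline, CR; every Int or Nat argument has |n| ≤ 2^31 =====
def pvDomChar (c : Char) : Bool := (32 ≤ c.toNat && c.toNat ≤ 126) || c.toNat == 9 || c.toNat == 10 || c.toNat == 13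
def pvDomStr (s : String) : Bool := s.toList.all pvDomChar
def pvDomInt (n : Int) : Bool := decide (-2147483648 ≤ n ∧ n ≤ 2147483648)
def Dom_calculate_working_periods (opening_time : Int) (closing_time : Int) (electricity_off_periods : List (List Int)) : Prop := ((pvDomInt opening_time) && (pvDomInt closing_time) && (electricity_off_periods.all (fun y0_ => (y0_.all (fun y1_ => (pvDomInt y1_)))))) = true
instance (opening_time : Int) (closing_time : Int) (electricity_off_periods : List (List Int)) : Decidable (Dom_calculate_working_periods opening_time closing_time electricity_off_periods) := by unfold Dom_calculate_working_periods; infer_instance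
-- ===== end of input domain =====

-- B replaces A's guard/index-loop/guard accumulation by pairing up a flat boundary list
-- [opening] ++ all outage endpoints ++ [closing] and trimming head/tail by the same two
-- guards (objective: alternative decomposition, same cost).

-- ===== PORT A =====
-- eps[i][j] is ported as PySem.List.pyGetD (IndexError → default, excluded by Pre_).
def calculate_working_periods (opening_time : Int) (closing_time : Int) (electricity_off_periods : List (List Int)) : List (List Int) :=
  let wp : List (List Int) := []
  let wp := if opening_time < PySem.List.pyGetD (PySem.List.pyGetD electricity_off_periods 0 []) 0 0 then
      wp ++ [[opening_time, PySem.List.pyGetD (PySem.List.pyGetD electricity_off_periods 0 []) 0 0]] else wp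
  let wp := (PySem.List.pyRange 0 ((electricity_off_periods.length : Int) - 1) 1).foldl
      (fun acc i => acc ++ [[PySem.List.pyGetD (PySem.List.pyGetD electricity_off_periods i []) 1 0,
                             PySem.List.pyGetD (PySem.List.pyGetD electricity_off_periods (i + 1) []) 0 0]]) wp
  let wp := if PySem.List.pyGetD (PySem.List.pyGetD electricity_off_periods (-1) []) 1 0 < closing_time then
      wp ++ [[PySem.List.pyGetD (PySem.List.pyGetD electricity_off_periods (-1) []) 1 0, closing_time]] else wp
  wp

-- ===== PORT B =====
-- _pair_up: recursive pairing of consecutive boundary points (Source B's recursion)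
def pairUp : List Int → List (List Int)
  | a :: b :: rest => [a, b] :: pairUp rest
  | _ => []

def calculate_working_periods_alt (opening_time : Int) (closing_time : Int) (electricity_off_periods : List (List Int)) : List (List Int) :=
  let pts := [opening_time] ++ electricity_off_periods.flatMap
      (fun p => [PySem.List.pyGetD p 0 0, PySem.List.pyGetD p 1 0]) ++ [closing_time]
  let periods := pairUp pts
  let periods := if ¬ (opening_time < PySem.List.pyGetD (PySem.List.pyGetD electricity_off_periods 0 []) 0 0) then
      PySem.List.slice periods (some 1) none else periods
  let periods := if ¬ (PySem.List.pyGetD (PySem.List.pyGetD electricity_off_periods (-1) []) 1 0 < closing_time) then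
      PySem.List.slice periods none (some (-1)) else periods
  periods

-- ===== PRECONDITION & SPEC =====
-- Pre_ excludes exactly the inputs where Python A raises IndexError: an empty outage
-- list (eps[0] / eps[-1]) or an outage entry with fewer than two elements (p[0] / p[1]).
def Pre_calculate_working_periods (opening_time : Int) (closing_time : Int) (electricity_off_periods : List (List Int)) : Prop :=
  electricity_off_periods ≠ [] ∧ ∀ p ∈ electricity_off_periods, 2 ≤ p.length
instance (opening_time : Int) (closing_time : Int) (electricity_off_periods : List (List Int)) : Decidable (Pre_calculate_working_periods opening_time closing_time electricity_off_periods) := by unfold Pre_calculate_working_periods; infer_instance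

def pvWitness_calculate_working_periods : Int × Int × List (List Int) := (8, 20, [[9, 11], [13, 14]])

def Spec_calculate_working_periods (opening_time : Int) (closing_time : Int) (electricity_off_periods : List (List Int)) (out : List (List Int)) : Prop := out = calculate_working_periods_alt opening_time closing_time electricity_off_periods
instance (opening_time : Int) (closing_time : Int) (electricity_off_periods : List (List Int)) (out : List (List Int)) : Decidable (Spec_calculate_working_periods opening_time closing_time electricity_off_periods out) := by unfold Spec_calculate_working_periods; infer_instance

-- ===== CLAIM (what is proved, stated in full; the proofs are below) =====
def Claim_equal_calculate_working_periods : Prop := ∀ (opening_time : Int) (closing_time : Int) (electricity_off_periods : List (List Int)), Dom_calculate_working_periods opening_time closing_time electricity_off_periods → Pre_calculate_working_periods opening_time closing_time electricity_off_periods → Spec_calculate_working_periods opening_time closing_time electricity_off_periods (calculate_working_periods opening_time closing_time electricity_off_periods)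

-- ===== LEMMAS AND PROOFS =====

-- the middle working periods, structurally: one period between each adjacent pair of outages
def adjMids : List (List Int) → List (List Int)
  | p :: q :: rest => [PySem.List.pyGetD p 1 0, PySem.List.pyGetD q 0 0] :: adjMids (q :: rest)
  | _ => []

-- A's index loop computes adjMids
lemma range_map_eq_adjMids (eps : List (List Int)) :
    (List.range (eps.length - 1)).map
      (fun (k : Nat) => [PySem.List.pyGetD (PySem.List.pyGetD eps (k : Int) []) 1 0,
                 PySem.List.pyGetD (PySem.List.pyGetD eps ((k : Int) + 1) []) 0 0]) = adjMids eps := by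
  match eps with
  | [] => simp [adjMids]
  | [p] => simp [adjMids]
  | p :: q :: rest =>
    have ih := range_map_eq_adjMids (q :: rest)
    simp only [List.length_cons, Nat.add_sub_cancel] at ih ⊢
    rw [List.range_succ_eq_map, List.map_cons, List.map_map, adjMids, List.cons.injEq]
    refine ⟨?_, ?_⟩
    · simp [pysem]
    · rw [← ih]
      apply List.map_congr_left
      intro k _
      simp only [Function.comp, Nat.succ_eq_add_one]
      rw [show ((k+1:Nat):Int) + 1 = ((k+2:Nat):Int) by push_cast; ring,
          show ((k:Int) + 1) = ((k+1:Nat):Int) by push_cast; ring]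
      simp only [PySem.List.pyGetD_natCast]
      simp [List.getD]

-- B's pairUp of the flat boundary list, on a nonempty outage list
lemma pairUp_flat (p : List Int) (rest : List (List Int)) (o c : Int) :
    pairUp ([o] ++ (p :: rest).flatMap (fun q => [PySem.List.pyGetD q 0 0, PySem.List.pyGetD q 1 0]) ++ [c]) =
      [o, PySem.List.pyGetD p 0 0] :: (adjMids (p :: rest) ++
        [[PySem.List.pyGetD ((p :: rest).getLast (by simp)) 1 0, c]]) := by
  match rest with
  | [] => simp [pairUp, adjMids]
  | q :: rs =>
    have ih := pairUp_flat q rs (PySem.List.pyGetD p 1 0) c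
    simp [pairUp, adjMids, List.getLast_cons] at ih ⊢
    simpa using ih

theorem main_equiv (o c : Int) (eps : List (List Int)) (hne : eps ≠ []) :
    calculate_working_periods o c eps = calculate_working_periods_alt o c eps := by
  obtain ⟨p, rest, rfl⟩ : ∃ p rest, eps = p :: rest := by
    cases eps with
    | nil => exact absurd rfl hne
    | cons a l => exact ⟨a, l, rfl⟩
  simp only [calculate_working_periods, calculate_working_periods_alt]
  rw [PySem.List.foldl_append_singleton_eq_map, PySem.List.pyRange_one, List.map_map]
  rw [show (((((p :: rest).length : Int)) - 1) - 0).toNat = (p :: rest).length - 1 by omega]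
  have hmap : (List.range ((p :: rest).length - 1)).map
      ((fun i => [PySem.List.pyGetD (PySem.List.pyGetD (p :: rest) i []) 1 0,
                  PySem.List.pyGetD (PySem.List.pyGetD (p :: rest) (i + 1) []) 0 0]) ∘ fun (k : Nat) => 0 + (k : Int))
      = adjMids (p :: rest) := by
    rw [← range_map_eq_adjMids (p :: rest)]
    apply List.map_congr_left
    intro k _
    simp
  rw [hmap, pairUp_flat p rest o c]
  rw [PySem.List.slice_from_one, PySem.List.slice_to_neg_one]
  rw [PySem.List.pyGetD_zero_cons, PySem.List.pyGetD_neg_one (p :: rest) [] (by simp)]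
  have hdrop : ∀ (x : List Int) (M : List (List Int)) (y : List Int),
      (x :: (M ++ [y])).dropLast = x :: M := by
    intro x M y
    rw [← List.cons_append, List.dropLast_concat]
  split_ifs with h1 h2 h2 <;> simp [hdrop]

-- ===== VERDICT (by name: the statement is the Claim_ definition above) =====
theorem calculate_working_periods_spec : Claim_equal_calculate_working_periods := by
  intro o c eps _ hpre
  exact main_equiv o c eps hpre.1
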